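-- pv_equiv track=rewrite | github.com/UnSstrennen/ReshuEGE_inf_2021 | 22.py | F
-- ===== SOURCE A (Python) =====
-- def F(x):
--     a = 0
--     b = 0
--     while x > 0:
--         a += 1
--         b +=x % 10
--         x //=  10
--     return a, b
-- ===== SOURCE B (Python) =====
-- def F(x):
--     if x <= 0:
--         return (0, 0)
--     s = str(x)
--     return (len(s), sum(map(int, s)))
-- ===== Notes on version B (the rewrite author's own statement) =====
-- stated objective: idiomatic
-- what changed: Replaces the digit-peeling while-loop over modulus and floor-division with the idiomatic string-based form: length of the decimal representation and a sum over its characters, with an explicit guard for non-positive inputs where the loop never runs.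
import Mathlib
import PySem

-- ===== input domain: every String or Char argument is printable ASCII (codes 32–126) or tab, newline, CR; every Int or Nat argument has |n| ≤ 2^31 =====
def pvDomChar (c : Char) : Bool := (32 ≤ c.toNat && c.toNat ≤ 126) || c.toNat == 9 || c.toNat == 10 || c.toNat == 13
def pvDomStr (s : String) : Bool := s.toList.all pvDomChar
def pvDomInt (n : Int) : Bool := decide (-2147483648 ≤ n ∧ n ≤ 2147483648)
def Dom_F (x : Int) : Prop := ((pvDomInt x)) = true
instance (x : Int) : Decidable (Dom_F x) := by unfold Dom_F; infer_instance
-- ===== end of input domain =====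

-- B replaces A's %10 / //10 digit-peeling loop with the idiomatic str(x)-based form (objective: idiomatic).

-- ===== PORT A =====
-- the while-loop of A, with its two accumulators a (count) and b (digit sum)
def Floop (x a b : Int) : Int × Int :=
  if 0 < x then
    Floop (PySem.Int.floordiv x 10) (a + 1) (b + PySem.Int.mod x 10)
  else (a, b)
termination_by x.toNat
decreasing_by
  rw [PySem.Int.floordiv_eq_ediv_of_pos (by norm_num)]
  omega

def F (x : Int) : Int × Int := Floop x 0 0

-- ===== PORT B =====
-- int(c) on a one-character string, exact where c is a decimal digit (the only case reached)
def digitVal (c : Char) : Int := (PySem.Int.ofChars? [c]).getD 0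

def F_alt (x : Int) : Int × Int :=
  if x ≤ 0 then (0, 0)
  else
    let s := PySem.Int.toStr x
    (PySem.Str.len s, (s.toList.map digitVal).sum)

-- ===== PRECONDITION & SPEC =====
def Spec_F (x : Int) (out : Int × Int) : Prop := out = F_alt x
instance (x : Int) (out : Int × Int) : Decidable (Spec_F x out) := by unfold Spec_F; infer_instance

-- ===== CLAIM (what is proved, stated in full; the proofs are below) =====
def Claim_equal_F : Prop := ∀ (x : Int), Dom_F x → Spec_F x (F x)

-- ===== LEMMAS AND PROOFS =====

-- the loop computes length and sum of Nat.digits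
lemma Floop_eq (n : Nat) (a b : Int) :
    Floop (n : Int) a b =
      (a + ((Nat.digits 10 n).length : Int), b + ((Nat.digits 10 n).sum : Int)) := by
  induction n using Nat.strong_induction_on generalizing a b with
  | _ n ih =>
    rw [Floop]
    by_cases hn : 0 < n
    · simp only [show (0 : Int) < (n : Int) by exact_mod_cast hn, if_pos]
      rw [PySem.Int.floordiv_eq_ediv_of_pos (by norm_num),
          PySem.Int.mod_eq_emod_of_pos (by norm_num)]
      have h1 : (n : Int) / 10 = ((n / 10 : Nat) : Int) := by omega
      have h2 : (n : Int) % 10 = ((n % 10 : Nat) : Int) := by omega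
      rw [h1, h2, ih (n / 10) (Nat.div_lt_self hn (by norm_num)),
          Nat.digits_def' (by norm_num : 1 < 10) hn]
      simp
      omega
    · have h0 : n = 0 := by omega
      subst h0
      simp

-- core's toDigitsCore for a positive n, with enough fuel, is reversed Nat.digits rendered as chars
lemma toDigitsCore_eq (fuel : Nat) : ∀ (n : Nat) (ds : List Char), 0 < n → n < fuel →
    Nat.toDigitsCore 10 fuel n ds = ((Nat.digits 10 n).map Nat.digitChar).reverse ++ ds := by
  induction fuel with
  | zero => intro n ds hn hf; omega
  | succ f ih =>
    intro n ds hn hf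
    simp only [Nat.toDigitsCore]
    rw [Nat.digits_def' (by norm_num : 1 < 10) hn]
    by_cases h : n / 10 = 0
    · simp [h]
    · rw [if_neg h, ih (n / 10) _ (Nat.pos_of_ne_zero h)
        (lt_of_lt_of_le (Nat.div_lt_self hn (by norm_num)) (by omega))]
      simp

lemma toDigits_eq (n : Nat) (hn : 0 < n) :
    Nat.toDigits 10 n = ((Nat.digits 10 n).map Nat.digitChar).reverse := by
  rw [Nat.toDigits, toDigitsCore_eq (n + 1) n [] hn (by omega), List.append_nil]

lemma digitVal_digitChar (d : Nat) (hd : d < 10) : digitVal (Nat.digitChar d) = (d : Int) := by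
  interval_cases d <;> decide

theorem F_equal_total (x : Int) : F x = F_alt x := by
  by_cases hx : 0 < x
  · have hrepr : x = ((x.toNat : Nat) : Int) := by omega
    rw [F, F_alt, if_neg (by omega), hrepr, Floop_eq]
    have htn : 0 < x.toNat := by omega
    simp only [PySem.Str.len, PySem.Int.toList_toStr, PySem.Int.toChars,
      if_neg (by omega : ¬ ((x.toNat : Nat) : Int) < 0), Int.toNat_natCast,
      toDigits_eq x.toNat htn]
    simp only [Prod.mk.injEq]
    refine ⟨by simp, ?_⟩
    rw [List.map_reverse, List.sum_reverse, List.map_map]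
    have : (Nat.digits 10 x.toNat).map (digitVal ∘ Nat.digitChar)
           = (Nat.digits 10 x.toNat).map (Nat.cast : Nat → Int) := by
      apply List.map_congr_left
      intro d hd
      exact digitVal_digitChar d (Nat.digits_lt_base (by norm_num) hd)
    rw [this, ← Nat.cast_list_sum]
    omega
  · rw [F, Floop, if_neg hx, F_alt, if_pos (by omega)]

-- ===== VERDICT (by name: the statement is the Claim_ definition above) =====
theorem F_spec : Claim_equal_F := by
  intro x _
  exact F_equal_total x
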